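-- pv_equiv track=rewrite | github.com/AlbinoLoaf/brAIncells | utils/visual_utils.py | dict_to_counts
-- ===== SOURCE A (Python) =====
-- from collections import Counter
--
-- def dict_to_counts(d):
--
--     nodes = []
--     for key in d.keys():
--
--         curr_list = []
--         [curr_list.extend(x) for x in d[key]]
--         nodes.extend(curr_list)
--
--     counts = Counter(nodes)
--
--     # check all nodes have at least a count of 1 (appear in the counter)
--     if len(counts.keys()) != 22:
--
--         # add count of 0 for all nodes that don't appear in the counter
--         for i in range(22):
--             if i not in counts.keys():
--                 counts[i] = 0
--
--     return [counts[i] for i in range(22)]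
-- ===== SOURCE B (Python) =====
-- def dict_to_counts(d):
--     counts = [0] * 22
--     for key in d:
--         for sub in d[key]:
--             for e in sub:
--                 if 0 <= e < 22:
--                     counts[e] += 1
--     return counts
-- ===== Notes on version B (the rewrite author's own statement) =====
-- stated objective: simpler
-- what changed: B replaces A's nodes-list accumulation + Counter + zero-fill branch + final comprehension with a single pass that increments a dense 22-slot histogram directly (range-guarded), returning it as-is.
import Mathlib
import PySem

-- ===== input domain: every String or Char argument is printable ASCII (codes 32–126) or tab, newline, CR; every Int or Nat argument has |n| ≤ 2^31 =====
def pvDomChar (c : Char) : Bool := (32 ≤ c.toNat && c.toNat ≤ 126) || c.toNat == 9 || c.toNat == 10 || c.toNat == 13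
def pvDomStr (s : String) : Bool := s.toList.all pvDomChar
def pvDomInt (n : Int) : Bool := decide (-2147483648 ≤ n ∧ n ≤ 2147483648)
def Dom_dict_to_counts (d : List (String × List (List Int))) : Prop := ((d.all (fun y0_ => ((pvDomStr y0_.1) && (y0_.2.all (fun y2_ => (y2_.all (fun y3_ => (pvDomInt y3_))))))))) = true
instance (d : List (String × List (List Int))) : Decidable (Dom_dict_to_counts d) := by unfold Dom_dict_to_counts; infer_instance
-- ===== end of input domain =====

-- B changes the data structure: one pass incrementing a dense 22-slot list instead of
-- A's node-list accumulation + Counter + zero-fill branch + final comprehension (objective: simpler).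

-- ===== PORT A =====
-- nodes.extend(curr_list) where curr_list extends each sublist of d[key]
def pvNodesOfVal (v : List (List Int)) : List Int :=
  v.foldl (fun curr_list x => curr_list ++ x) []

def dict_to_counts (d : List (String × List (List Int))) : List Int :=
  -- for key in d.keys(): … nodes.extend(curr_list)  (keys of a Python dict are unique,
  -- so iterating keys and indexing equals iterating the items in order)
  let nodes := d.foldl (fun nodes kv => nodes ++ pvNodesOfVal kv.2) []
  let counts := PySem.Dict.counter nodes
  let counts :=
    if (PySem.Dict.keys counts).length ≠ 22 then
      (PySem.List.pyRange 0 22 1).foldl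
        (fun c i => if c.contains i then c else c.insert i 0) counts
    else counts
  (PySem.List.pyRange 0 22 1).map (fun i => counts.getD i 0)

-- ===== PORT B =====
-- counts[e] += 1 guarded by 0 <= e < 22
def pvStep (counts : List Int) (e : Int) : List Int :=
  if 0 ≤ e ∧ e < 22 then counts.set e.toNat (counts.getD e.toNat 0 + 1) else counts

def dict_to_counts_alt (d : List (String × List (List Int))) : List Int :=
  d.foldl (fun counts kv =>
    kv.2.foldl (fun counts sub => sub.foldl pvStep counts) counts)
    (List.replicate 22 0)

-- ===== PRECONDITION & SPEC =====
def Spec_dict_to_counts (d : List (String × List (List Int))) (out : List Int) : Prop := out = dict_to_counts_alt d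
instance (d : List (String × List (List Int))) (out : List Int) : Decidable (Spec_dict_to_counts d out) := by unfold Spec_dict_to_counts; infer_instance

-- ===== CLAIM (what is proved, stated in full; the proofs are below) =====
def Claim_equal_dict_to_counts : Prop := ∀ (d : List (String × List (List Int))), Dom_dict_to_counts d → Spec_dict_to_counts d (dict_to_counts d)

-- ===== LEMMAS AND PROOFS =====

-- the flattened node list both programs traverse
def pvFlat (d : List (String × List (List Int))) : List Int :=
  d.flatMap (fun kv => kv.2.flatten)

theorem pvNodesOfVal_eq (v : List (List Int)) : pvNodesOfVal v = v.flatten := by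
  have h : ∀ (v : List (List Int)) (acc : List Int),
      v.foldl (fun curr_list x => curr_list ++ x) acc = acc ++ v.flatten := by
    intro v
    induction v with
    | nil => simp
    | cons x xs ih => intro acc; simp [List.foldl, ih, List.append_assoc]
  simpa [pvNodesOfVal] using h v []

theorem pvNodes_eq (d : List (String × List (List Int))) :
    d.foldl (fun nodes kv => nodes ++ pvNodesOfVal kv.2) [] = pvFlat d := by
  have h : ∀ (d : List (String × List (List Int))) (acc : List Int),
      d.foldl (fun nodes kv => nodes ++ pvNodesOfVal kv.2) acc = acc ++ pvFlat d := by
    intro d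
    induction d with
    | nil => simp [pvFlat]
    | cons kv rest ih =>
        intro acc
        simp [List.foldl, pvFlat, pvNodesOfVal_eq, List.append_assoc, List.flatMap_def]
  simpa using h d []

-- zero-filling missing keys with 0 does not change getD _ 0
theorem pvZerofill_getD (l : List Int) (c : PySem.Dict Int Int) (j : Int) :
    (l.foldl (fun c i => if c.contains i then c else c.insert i 0) c).getD j 0
      = c.getD j 0 := by
  induction l generalizing c with
  | nil => rfl
  | cons i rest ih =>
      simp only [List.foldl]
      by_cases h : c.contains i = true
      · simp [h, ih]
      · simp only [h, if_false, Bool.false_eq_true, ih]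
        rw [PySem.Dict.getD_insert]
        by_cases hji : j = i
        · subst hji
          simp [PySem.Dict.getD_of_not_contains c 0 (by simpa using h)]
        · simp [hji]

theorem pvA_char (d : List (String × List (List Int))) :
    dict_to_counts d = (List.range 22).map (fun j => (((pvFlat d).count ((j : Nat) : Int) : Int))) := by
  have hR : PySem.List.pyRange 0 22 1 = (List.range 22).map (fun j => ((j : Nat) : Int)) := by
    decide
  unfold dict_to_counts
  rw [pvNodes_eq, hR]
  simp only [List.map_map]
  refine List.map_congr_left ?_
  intro j _
  simp only [Function.comp]
  split_ifs with h
  · rw [pvZerofill_getD, PySem.Dict.getD_counter]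
  · rw [PySem.Dict.getD_counter]

theorem pvStep_length (cl : List Int) (e : Int) : (pvStep cl e).length = cl.length := by
  unfold pvStep; split_ifs <;> simp

theorem pvHist_length (es : List Int) (cl : List Int) :
    (es.foldl pvStep cl).length = cl.length := by
  induction es generalizing cl with
  | nil => rfl
  | cons e rest ih => simp [List.foldl, ih, pvStep_length]

theorem pvStep_getD (cl : List Int) (e : Int) (j : Nat)
    (hlen : cl.length = 22) (hj : j < 22) :
    (pvStep cl e).getD j 0 = cl.getD j 0 + (if e = (j : Int) then 1 else 0) := by
  unfold pvStep
  split_ifs with h he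
  · -- in range, e = j
    have hnat : e.toNat = j := by omega
    rw [List.getD_eq_getElem?_getD, List.getD_eq_getElem?_getD, List.getElem?_set, hnat]
    simp [hlen, hj]
  · -- in range, e ≠ j
    have hnat : e.toNat ≠ j := by omega
    rw [List.getD_eq_getElem?_getD, List.getD_eq_getElem?_getD, List.getElem?_set]
    simp [hnat]
  · -- out of range but e = j: impossible since 0 ≤ j < 22
    exfalso; omega
  · simp

theorem pvHist_getD (es : List Int) (cl : List Int) (j : Nat)
    (hlen : cl.length = 22) (hj : j < 22) :
    (es.foldl pvStep cl).getD j 0 = cl.getD j 0 + (es.count ((j : Nat) : Int) : Int) := by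
  induction es generalizing cl with
  | nil => simp
  | cons e rest ih =>
      have hlen' : (pvStep cl e).length = 22 := by rw [pvStep_length, hlen]
      simp only [List.foldl, ih (pvStep cl e) hlen', List.count_cons,
        pvStep_getD cl e j hlen hj]
      by_cases h : e = (j : Int)
      · simp [h]
        ring
      · simp [h]

theorem pvBloop_eq (d : List (String × List (List Int))) (cl : List Int) :
    d.foldl (fun counts kv =>
        kv.2.foldl (fun counts sub => sub.foldl pvStep counts) counts) cl
      = (pvFlat d).foldl pvStep cl := by
  induction d generalizing cl with
  | nil => rfl
  | cons kv rest ih =>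
      simp only [List.foldl, pvFlat, List.flatMap_cons, List.foldl_append, ih]
      congr 1
      clear ih
      induction kv.2 generalizing cl with
      | nil => rfl
      | cons sub subs ih2 => simp [List.foldl, List.flatten, List.foldl_append, ih2]

theorem pvB_char (d : List (String × List (List Int))) :
    dict_to_counts_alt d = (List.range 22).map (fun j => (((pvFlat d).count ((j : Nat) : Int) : Int))) := by
  unfold dict_to_counts_alt
  rw [pvBloop_eq]
  apply List.ext_getElem
  · simp [pvHist_length]
  · intro j h1 h2
    have hj : j < 22 := by simpa using h2
    rw [← List.getD_eq_getElem _ 0 h1]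
    rw [pvHist_getD _ _ _ (by simp) hj]
    simp only [List.getD_eq_getElem?_getD, List.getElem?_replicate, hj, if_pos]
    simp

-- ===== VERDICT (by name: the statement is the Claim_ definition above) =====
theorem dict_to_counts_spec : Claim_equal_dict_to_counts := by
  intro d _
  unfold Spec_dict_to_counts
  rw [pvA_char, pvB_char]
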